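-- pv_equiv track=rewrite | github.com/Gopichand995/bigdata | peace_/hackerrank/piling_cubes.py | cube
-- ===== SOURCE A (Python) =====
-- def cube(arr):
--     n = len(arr)
--     if n == 1 or n == 2:
--         return "Yes"
--     if arr[0] <= arr[n - 1]:
--         if arr[n - 2] > arr[n - 1]:
--             return "No"
--         return cube(arr[:n - 1])
--     if arr[0] > arr[n - 1]:
--         if arr[1] > arr[0]:
--             return "No"
--         return cube(arr[1:n])
-- ===== SOURCE B (Python) =====
-- def cube(arr):
--     # Two-pointer scan over the original list; no slicing, no recursion.
--     i, j = 0, len(arr) - 1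
--     while j - i >= 2:
--         if arr[i] <= arr[j]:
--             if arr[j - 1] > arr[j]:
--                 return "No"
--             j -= 1
--         else:
--             if arr[i + 1] > arr[i]:
--                 return "No"
--             i += 1
--     return "Yes"
-- ===== Notes on version B (the rewrite author's own statement) =====
-- stated objective: faster
-- what changed: Replaced A's slicing recursion (each step copies an O(n) slice) by an iterative two-pointer scan over the original list using indices i and j.
import Mathlib
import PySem

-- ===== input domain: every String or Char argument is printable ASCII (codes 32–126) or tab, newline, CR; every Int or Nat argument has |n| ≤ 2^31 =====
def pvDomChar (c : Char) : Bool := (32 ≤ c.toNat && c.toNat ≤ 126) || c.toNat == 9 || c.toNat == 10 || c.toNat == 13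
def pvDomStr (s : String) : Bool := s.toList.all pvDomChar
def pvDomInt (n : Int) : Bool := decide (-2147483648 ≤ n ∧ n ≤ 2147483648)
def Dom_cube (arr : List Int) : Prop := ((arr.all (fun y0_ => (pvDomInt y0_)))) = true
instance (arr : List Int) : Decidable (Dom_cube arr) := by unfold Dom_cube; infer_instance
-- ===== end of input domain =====

-- B replaces A's slicing recursion by an iterative two-pointer index scan (return value only; neither mutates its argument).

-- ===== PORT A =====
-- Literal port of A's recursion.  Python raises IndexError at arr[0] on the empty list;
-- the 'n = 0' guard only makes the recursion total there (outside Pre_cube), and the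
-- '.getD 0' defaults are never taken for n ≥ 3.  The final Python 'if arr[0] > arr[n-1]'
-- is the exhaustive else of the previous test, so it is the 'else' branch here.
def cube (arr : List Int) : String :=
  let n := arr.length
  if n = 0 then ""   -- Python: IndexError (excluded by Pre_cube)
  else if n = 1 ∨ n = 2 then "Yes"
  else if (PySem.List.pyGet? arr 0).getD 0 ≤ (PySem.List.pyGet? arr ((n : Int) - 1)).getD 0 then
    if (PySem.List.pyGet? arr ((n : Int) - 2)).getD 0 > (PySem.List.pyGet? arr ((n : Int) - 1)).getD 0 then "No"
    else cube (PySem.List.slice arr none (some ((n : Int) - 1)))          -- arr[:n-1]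
  else
    if (PySem.List.pyGet? arr 1).getD 0 > (PySem.List.pyGet? arr 0).getD 0 then "No"
    else cube (PySem.List.slice arr (some 1) (some ((n : Int))))          -- arr[1:n]
termination_by arr.length
decreasing_by
  · rw [PySem.List.slice_to arr (b := (arr.length : Int) - 1) (by omega)]
    simp only [List.length_take]
    omega
  · rw [PySem.List.slice_toNat arr (a := 1) (b := (arr.length : Int)) (by omega) (by omega)]
    simp only [List.length_take, List.length_drop]
    omega

-- ===== PORT B =====
-- The while loop of Source B as recursion on the gap j - i (j = len-1; for the empty list
-- Python's j = -1 and this Nat 0 both leave the loop untaken, returning "Yes").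
def cubeAltAux (arr : List Int) (i j : Nat) : String :=
  if i + 2 ≤ j then
    if arr.getD i 0 ≤ arr.getD j 0 then
      if arr.getD (j - 1) 0 > arr.getD j 0 then "No"
      else cubeAltAux arr i (j - 1)
    else
      if arr.getD (i + 1) 0 > arr.getD i 0 then "No"
      else cubeAltAux arr (i + 1) j
  else "Yes"
termination_by j - i

def cube_alt (arr : List Int) : String := cubeAltAux arr 0 (arr.length - 1)

-- ===== PRECONDITION & SPEC =====
-- Pre_cube excludes only the empty list, on which A raises IndexError.
def Pre_cube (arr : List Int) : Prop := arr ≠ []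
instance (arr : List Int) : Decidable (Pre_cube arr) := by unfold Pre_cube; infer_instance
def pvWitness_cube : List Int := [3, 2, 1, 2]

def Spec_cube (arr : List Int) (out : String) : Prop := out = cube_alt arr
instance (arr : List Int) (out : String) : Decidable (Spec_cube arr out) := by unfold Spec_cube; infer_instance

-- ===== CLAIM (what is proved, stated in full; the proofs are below) =====
def Claim_equal_cube : Prop := ∀ (arr : List Int), Dom_cube arr → Pre_cube arr → Spec_cube arr (cube arr)

-- ===== LEMMAS AND PROOFS =====

-- the segment arr[i..j] (inclusive) that A's recursion currently works on
def seg (arr : List Int) (i j : Nat) : List Int := (arr.drop i).take (j + 1 - i)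

lemma seg_length (arr : List Int) (i j : Nat) (_hij : i ≤ j) (hj : j < arr.length) :
    (seg arr i j).length = j + 1 - i := by
  simp [seg]; omega

lemma seg_get (arr : List Int) (i j k : Nat) (hk : k < j + 1 - i) (_hj : j < arr.length) :
    (seg arr i j).getD k 0 = arr.getD (i + k) 0 := by
  unfold seg
  rw [List.getD_eq_getElem?_getD, List.getD_eq_getElem?_getD,
      List.getElem?_take_of_lt hk, List.getElem?_drop]

lemma seg_main (arr : List Int) (d i j : Nat) (hd : j - i = d) (hij : i ≤ j)
    (hj : j < arr.length) : cube (seg arr i j) = cubeAltAux arr i j := by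
  induction d generalizing i j with
  | zero =>
    rw [cube, cubeAltAux]
    have hl := seg_length arr i j hij hj
    have h1 : j + 1 - i = 1 := by omega
    rw [h1] at hl
    simp [hl]
    omega
  | succ d ih =>
    rw [cube, cubeAltAux]
    have hl := seg_length arr i j hij hj
    by_cases hgap : i + 2 ≤ j
    · -- the loop/recursion step: length ≥ 3
      have hn3 : 3 ≤ (seg arr i j).length := by omega
      have hne : ¬ ((seg arr i j).length = 0) := by omega
      have hne12 : ¬ ((seg arr i j).length = 1 ∨ (seg arr i j).length = 2) := by omega
      -- evaluate the three int-indexed accesses of A on the segment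
      have e0 : (PySem.List.pyGet? (seg arr i j) 0).getD 0 = arr.getD i 0 := by
        rw [PySem.List.pyGet?_of_nonneg (seg arr i j) (i := 0) (by omega)]
        have := seg_get arr i j 0 (by omega) hj
        simpa [List.getD_eq_getElem?_getD] using this
      have e1 : (PySem.List.pyGet? (seg arr i j) 1).getD 0 = arr.getD (i + 1) 0 := by
        rw [PySem.List.pyGet?_of_nonneg (seg arr i j) (i := 1) (by omega)]
        have := seg_get arr i j 1 (by omega) hj
        simpa [List.getD_eq_getElem?_getD] using this
      have elast : (PySem.List.pyGet? (seg arr i j) (((seg arr i j).length : Int) - 1)).getD 0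
          = arr.getD j 0 := by
        rw [PySem.List.pyGet?_of_nonneg (seg arr i j) (i := ((seg arr i j).length : Int) - 1) (by omega)]
        have hto : (((seg arr i j).length : Int) - 1).toNat = j - i := by omega
        rw [hto]
        have := seg_get arr i j (j - i) (by omega) hj
        have hidx : i + (j - i) = j := by omega
        rw [hidx] at this
        simpa [List.getD_eq_getElem?_getD] using this
      have elast2 : (PySem.List.pyGet? (seg arr i j) (((seg arr i j).length : Int) - 2)).getD 0
          = arr.getD (j - 1) 0 := by
        rw [PySem.List.pyGet?_of_nonneg (seg arr i j) (i := ((seg arr i j).length : Int) - 2) (by omega)]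
        have hto : (((seg arr i j).length : Int) - 2).toNat = j - 1 - i := by omega
        rw [hto]
        have := seg_get arr i j (j - 1 - i) (by omega) hj
        have hidx : i + (j - 1 - i) = j - 1 := by omega
        rw [hidx] at this
        simpa [List.getD_eq_getElem?_getD] using this
      -- the two slices of A are the two smaller segments
      have sl1 : PySem.List.slice (seg arr i j) none (some (((seg arr i j).length : Int) - 1))
          = seg arr i (j - 1) := by
        rw [PySem.List.slice_to (seg arr i j) (b := ((seg arr i j).length : Int) - 1) (by omega)]
        have hto : (((seg arr i j).length : Int) - 1).toNat = j - i := by omega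
        rw [hto]
        unfold seg
        rw [List.take_take]
        congr 1
        omega
      have sl2 : PySem.List.slice (seg arr i j) (some 1) (some ((seg arr i j).length : Int))
          = seg arr (i + 1) j := by
        rw [PySem.List.slice_toNat (seg arr i j) (a := 1) (b := ((seg arr i j).length : Int)) (by omega) (by omega)]
        simp only [Int.toNat_natCast, Int.toNat_one, hl]
        unfold seg
        simp only [List.drop_take, List.drop_drop, List.take_take]
        congr 1
        omega
      simp only [hne, if_false, hne12, if_false, hgap, if_pos, e0, e1, elast, elast2, sl1, sl2]
      split_ifs with hA hB hC
      · rfl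
      · exact ih i (j - 1) (by omega) (by omega) (by omega)
      · rfl
      · exact ih (i + 1) j (by omega) (by omega) hj
    · -- gap ≤ 1: both return "Yes"
      have h12 : (seg arr i j).length = 1 ∨ (seg arr i j).length = 2 := by omega
      have hne : ¬ ((seg arr i j).length = 0) := by omega
      simp [hne, h12, hgap]

-- ===== VERDICT (by name: the statement is the Claim_ definition above) =====
theorem cube_spec : Claim_equal_cube := by
  intro arr _ hpre
  unfold Spec_cube cube_alt
  have hlen : 0 < arr.length := List.length_pos_iff.mpr hpre
  have hseg : seg arr 0 (arr.length - 1) = arr := by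
    unfold seg
    simp
    omega
  have h := seg_main arr (arr.length - 1) 0 (arr.length - 1) (by omega) (by omega) (by omega)
  rw [hseg] at h
  exact h
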